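-- pv_equiv track=rewrite | github.com/mirrabeel/skill-voyage.sign-up1 | tavsatexi2.2.py | best_time_for_party
-- ===== SOURCE A (Python) =====
-- def best_time_for_party(times):
--     events= []
--
-- #თითოეული სტუმარი დროის ინტერვალის მიხედვით
--     for start, end in times:
--         events.append((start, 'start')) #სტუმრის მოსვლის დრო
--         events.append((end, 'end')) #სტუმრის წასვლის დრო
--
--     events.sort(key=lambda x: (x[0], x[1] == 'start'))
--
--     curent_guests = 0
--     max_guests = 0
--     best_time = None
--
--     for event in events:
--         if event[1] == 'start':
--             curent_guests += 1
--             if curent_guests > max_guests: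
--                 max_guests = curent_guests
--                 best_time = event[0]
--         else:
--             curent_guests -=1
--
--     return best_time
-- ===== SOURCE B (Python) =====
-- def best_time_for_party(times):
--     # Scan candidate times (the sorted arrival times); at each, count guests
--     # present as arrivals-so-far minus departures-so-far; keep the first
--     # candidate achieving a new strict maximum.
--     starts = sorted([s for s, _ in times])
--     best_time = None
--     best_count = 0
--     for t in starts:
--         arrived = sum(1 for s, _ in times if s <= t)
--         left = sum(1 for _, e in times if e <= t)
--         c = arrived - left
--         if c > best_count:
--             best_count = c
--             best_time = t
--     return best_time
-- ===== Notes on version B (the rewrite author's own statement) =====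
-- stated objective: alternative
-- what changed: Replaces A's build-and-sort-events sweep (tagged start/end events, running counter, running max) by a direct scan over the sorted arrival times, recounting at each candidate time the guests present as arrivals-so-far minus departures-so-far and keeping the first candidate that strictly improves the count.
import Mathlib
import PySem

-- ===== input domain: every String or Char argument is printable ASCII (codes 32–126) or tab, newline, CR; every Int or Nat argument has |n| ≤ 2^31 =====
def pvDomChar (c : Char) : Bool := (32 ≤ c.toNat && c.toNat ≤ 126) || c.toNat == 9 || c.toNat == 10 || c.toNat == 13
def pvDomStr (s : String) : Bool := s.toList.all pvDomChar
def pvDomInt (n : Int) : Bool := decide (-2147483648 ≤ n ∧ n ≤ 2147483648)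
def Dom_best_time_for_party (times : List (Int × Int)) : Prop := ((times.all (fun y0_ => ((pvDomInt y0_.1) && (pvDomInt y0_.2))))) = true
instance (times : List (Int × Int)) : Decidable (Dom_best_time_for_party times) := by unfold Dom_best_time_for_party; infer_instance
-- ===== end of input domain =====

-- B replaces A's sorted start/end event sweep by a quadratic scan of the sorted arrival
-- times, recounting the guests present at each candidate; alternative decomposition, not faster.

-- ===== PORT A =====
-- loop body of A's sweep, lifted to a named step function (state = (curent_guests, max_guests, best_time))
def pvStepA (st : Int × Int × Option Int) (ev : Int × String) : Int × Int × Option Int :=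
  if ev.2 == "start" then
    let cur := st.1 + 1
    if cur > st.2.1 then (cur, cur, some ev.1) else (cur, st.2.1, st.2.2)
  else (st.1 - 1, st.2.1, st.2.2)

def best_time_for_party (times : List (Int × Int)) : Option Int :=
  let events := times.foldl (fun acc p => acc ++ [(p.1, "start"), (p.2, "end")]) []
  let sortedEvents := PySem.List.sorted2 events (fun x => x.1) (fun x => x.2 == "start")
  (sortedEvents.foldl pvStepA (0, 0, none)).2.2

-- ===== PORT B =====
-- loop body of B's scan (state = (best_count, best_time)); counts are recomputed per candidate
def pvStepB (times : List (Int × Int)) (st : Int × Option Int) (t : Int) : Int × Option Int :=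
  let arrived := times.foldl (fun n p => if p.1 ≤ t then n + 1 else n) (0 : Int)
  let left := times.foldl (fun n p => if p.2 ≤ t then n + 1 else n) (0 : Int)
  let c := arrived - left
  if c > st.1 then (c, some t) else st

def best_time_for_party_alt (times : List (Int × Int)) : Option Int :=
  let starts := PySem.List.sorted (times.map (fun p => p.1)) (fun x => x)
  (starts.foldl (pvStepB times) ((0 : Int), (none : Option Int))).2

-- ===== PRECONDITION & SPEC =====
def Spec_best_time_for_party (times : List (Int × Int)) (out : Option Int) : Prop := out = best_time_for_party_alt times
instance (times : List (Int × Int)) (out : Option Int) : Decidable (Spec_best_time_for_party times out) := by unfold Spec_best_time_for_party; infer_instance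

-- ===== CLAIM (what is proved, stated in full; the proofs are below) =====
def Claim_equal_best_time_for_party : Prop := ∀ (times : List (Int × Int)), Dom_best_time_for_party times → Spec_best_time_for_party times (best_time_for_party times)

-- ===== LEMMAS AND PROOFS =====

-- event abbreviations used only by the proofs
def pvIsS (e : Int × String) : Bool := e.2 == "start"

def pvBef (a b : Int × String) : Bool :=
  decide (a.1 < b.1) || (!decide (b.1 < a.1) && decide ((a.2 == "start") < (b.2 == "start")))

def pvKeyLe (a b : Int × String) : Prop :=
  a.1 < b.1 ∨ (a.1 = b.1 ∧ (pvIsS a = true → pvIsS b = true))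

def pvStarts (L : List (Int × String)) : List Int := (L.filter pvIsS).map (fun e => e.1)

def pvNet (L : List (Int × String)) (t : Int) : Int :=
  ((L.countP (fun e => pvIsS e && decide (e.1 ≤ t)) : Int)
    - (L.countP (fun e => !pvIsS e && decide (e.1 ≤ t)) : Int))

def pvF (times : List (Int × Int)) (t : Int) : Int :=
  ((times.countP (fun p => decide (p.1 ≤ t)) : Int)
    - (times.countP (fun p => decide (p.2 ≤ t)) : Int))

def pvEv (times : List (Int × Int)) : List (Int × String) :=
  times.flatMap (fun p => [(p.1, "start"), (p.2, "end")])

def pvScan (f : Int → Int) : Int → Option Int → List Int → Option Int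
  | _, best, [] => best
  | mx, best, t :: ts => if f t > mx then pvScan f (f t) (some t) ts else pvScan f mx best ts

-- generic: insertBy with an asymmetric, transitive 'before' keeps the list sorted
theorem pv_insertBy_pairwise (before : (Int × String) → (Int × String) → Bool)
    (hasym : ∀ a b, before a b = true → before b a = false)
    (htrans : ∀ a b c, before a b = true → before b c = true → before a c = true)
    (x : Int × String) (ys : List (Int × String))
    (h : ys.Pairwise (fun a b => before b a = false)) :
    (PySem.List.insertBy before x ys).Pairwise (fun a b => before b a = false) := by
  induction ys with
  | nil => simp [PySem.List.insertBy]
  | cons y ys ih =>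
    rcases List.pairwise_cons.mp h with ⟨hy, hys⟩
    by_cases hb : before x y = true
    · rw [PySem.List.insertBy.eq_2, if_pos hb]
      refine List.pairwise_cons.mpr ⟨?_, h⟩
      intro z hz
      rcases List.mem_cons.mp hz with rfl | hz
      · exact hasym _ _ hb
      · by_contra hzx
        have hzx' : before z x = true := by
          revert hzx; cases before z x <;> simp
        have hzy := htrans _ _ _ hzx' hb
        have := hy z hz
        simp [hzy] at this
    · have hb' : before x y = false := by
        revert hb; cases before x y <;> simp
      rw [PySem.List.insertBy.eq_2, if_neg (by simp [hb'])]
      refine List.pairwise_cons.mpr ⟨?_, ih hys⟩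
      intro z hz
      rcases (PySem.List.insertBy_mem_iff before x z ys).mp hz with rfl | hz
      · exact hb'
      · exact hy z hz

theorem pv_bef_asym : ∀ a b, pvBef a b = true → pvBef b a = false := by
  intro a b
  simp only [pvBef, Bool.or_eq_true, Bool.and_eq_true, Bool.not_eq_true', decide_eq_true_eq,
    decide_eq_false_iff_not, Bool.or_eq_false_iff, Bool.and_eq_false_iff, Bool.not_eq_false',
    Bool.lt_iff]
  cases hA : (a.2 == "start") <;> cases hB : (b.2 == "start") <;> simp <;> omega

theorem pv_bef_trans : ∀ a b c, pvBef a b = true → pvBef b c = true → pvBef a c = true := by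
  intro a b c
  simp only [pvBef, Bool.or_eq_true, Bool.and_eq_true, Bool.not_eq_true', decide_eq_true_eq,
    decide_eq_false_iff_not, Bool.lt_iff]
  cases hA : (a.2 == "start") <;> cases hB : (b.2 == "start") <;> cases hC : (c.2 == "start") <;>
    simp <;> omega

theorem pv_bef_false_keyLe (a b : Int × String) (h : pvBef b a = false) : pvKeyLe a b := by
  simp only [pvBef, Bool.or_eq_false_iff, Bool.and_eq_false_iff, Bool.not_eq_false',
    decide_eq_false_iff_not, decide_eq_true_eq, Bool.lt_iff] at h
  simp only [pvKeyLe, pvIsS]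
  cases hA : (a.2 == "start") <;> cases hB : (b.2 == "start") <;> simp_all <;> omega

-- the sorted event list is pairwise pvKeyLe
theorem pv_sorted2_pairwise (xs : List (Int × String)) :
    (PySem.List.sorted2 xs (fun x => x.1) (fun x => x.2 == "start")).Pairwise pvKeyLe := by
  have hfold : ∀ (l : List (Int × String)) (acc : List (Int × String)),
      acc.Pairwise (fun a b => pvBef b a = false) →
      (l.foldl (fun acc x => PySem.List.insertBy pvBef x acc) acc).Pairwise
        (fun a b => pvBef b a = false) := by
    intro l
    induction l with
    | nil => intro acc h; simpa using h
    | cons x l ih =>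
      intro acc h
      exact ih _ (pv_insertBy_pairwise pvBef pv_bef_asym pv_bef_trans x acc h)
  have heq : PySem.List.sorted2 xs (fun x => x.1) (fun x => x.2 == "start")
      = xs.foldl (fun acc x => PySem.List.insertBy pvBef x acc) [] := rfl
  rw [heq]
  exact (hfold xs [] (by simp)).imp (fun h => pv_bef_false_keyLe _ _ h)

theorem pv_count_foldl (l : List (Int × Int)) (pred : Int × Int → Prop) [DecidablePred pred]
    (n : Int) :
    l.foldl (fun n p => if pred p then n + 1 else n) n
      = n + (l.countP (fun p => decide (pred p)) : Int) := by
  induction l generalizing n with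
  | nil => simp
  | cons p l ih =>
    simp only [List.foldl_cons, List.countP_cons]
    by_cases hp : pred p
    · rw [if_pos hp, ih, if_pos (by simpa using hp)]; push_cast; ring
    · rw [if_neg hp, ih, if_neg (by simpa using hp)]; push_cast; ring

-- B's loop equals pvScan with the recount function pvF
theorem pv_foldlB (times : List (Int × Int)) (ts : List Int) (mx : Int) (best : Option Int) :
    (ts.foldl (pvStepB times) (mx, best)).2 = pvScan (pvF times) mx best ts := by
  induction ts generalizing mx best with
  | nil => simp [pvScan]
  | cons t ts ih =>
    have hstep : pvStepB times (mx, best) t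
        = if pvF times t > mx then (pvF times t, some t) else (mx, best) := by
      simp only [pvStepB, pvF, pv_count_foldl times (fun p => p.1 ≤ t),
        pv_count_foldl times (fun p => p.2 ≤ t)]
      norm_num
    simp only [List.foldl_cons, hstep, pvScan]
    by_cases h : pvF times t > mx
    · rw [if_pos h, if_pos h, ih]
    · rw [if_neg h, if_neg h, ih]

theorem pv_stepA_start (cur mx : Int) (best : Option Int) (t0 : Int) :
    pvStepA (cur, mx, best) (t0, "start")
      = (cur + 1, max mx (cur + 1), if mx < cur + 1 then some t0 else best) := by
  simp only [pvStepA, beq_self_eq_true, if_true, gt_iff_lt]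
  by_cases h : mx < cur + 1
  · rw [if_pos h, if_pos h, max_eq_right (by omega)]
  · rw [if_neg h, if_neg h, max_eq_left (by omega)]

-- A's sweep over a block of identical start events, in closed form
theorem pv_blockA (t0 : Int) (m : ℕ) (cur mx : Int) (best : Option Int)
    (rest : List (Int × String)) :
    (List.replicate (m + 1) (t0, "start") ++ rest).foldl pvStepA (cur, mx, best)
      = rest.foldl pvStepA
          (cur + (m + 1), max mx (cur + (m + 1)),
            if mx < cur + (m + 1) then some t0 else best) := by
  induction m generalizing cur mx best with
  | zero =>
    simp only [List.replicate_succ, List.replicate_zero, List.nil_append, List.cons_append,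
      List.foldl_cons, pv_stepA_start]
    norm_num
  | succ m ih =>
    rw [List.replicate_succ, List.cons_append, List.foldl_cons, pv_stepA_start, ih]
    congr 1
    simp only [Prod.mk.injEq]
    push_cast
    refine ⟨by ring, by omega, ?_⟩
    split_ifs <;> first | rfl | omega

-- B's scan over a block of identical candidates, in closed form
theorem pv_blockB (f : Int → Int) (t0 : Int) (m : ℕ) (mx : Int) (best : Option Int)
    (ts : List Int) :
    pvScan f mx best (List.replicate (m + 1) t0 ++ ts)
      = pvScan f (max mx (f t0)) (if mx < f t0 then some t0 else best) ts := by
  induction m generalizing mx best with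
  | zero =>
    simp only [List.replicate_succ, List.replicate_zero, List.nil_append, List.cons_append,
      pvScan, gt_iff_lt]
    by_cases h : mx < f t0
    · rw [if_pos h, if_pos h, max_eq_right (by omega)]
    · rw [if_neg h, if_neg h, max_eq_left (by omega)]
  | succ m ih =>
    rw [List.replicate_succ, List.cons_append]
    show (if f t0 > mx then pvScan f (f t0) (some t0) _ else pvScan f mx best _) = _
    by_cases h : f t0 > mx
    · rw [if_pos h, ih]
      have h1 : max (f t0) (f t0) = f t0 := max_self _
      have h2 : max mx (f t0) = f t0 := max_eq_right (by omega)
      rw [h1, h2, if_neg (by omega), if_pos (by omega)]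
    · rw [if_neg h, ih]

theorem pv_net_cons (x : Int × String) (rest : List (Int × String)) (t : Int) :
    pvNet (x :: rest) t
      = (if pvIsS x && decide (x.1 ≤ t) then 1 else 0)
        - (if !pvIsS x && decide (x.1 ≤ t) then 1 else 0) + pvNet rest t := by
  simp only [pvNet, List.countP_cons]
  split_ifs <;> push_cast <;> omega

theorem pv_net_block (t0 t : Int) (m : ℕ) (rest : List (Int × String)) :
    pvNet (List.replicate m (t0, "start") ++ rest) t
      = (if t0 ≤ t then (m : Int) else 0) + pvNet rest t := by
  have h1 : pvIsS (t0, "start") = true := rfl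
  simp only [pvNet, List.countP_append, List.countP_replicate, h1, Bool.not_true,
    Bool.true_and, Bool.false_and]
  split_ifs with h <;> simp_all <;> ring

theorem pv_F2 (t0 : Int) (h : Int × String) (rtail : List (Int × String))
    (hne : (h == ((t0 : Int), "start")) = false)
    (hpair : (h :: rtail).Pairwise pvKeyLe)
    (hcross : ∀ x ∈ h :: rtail, pvKeyLe ((t0 : Int), "start") x)
    (hF1 : ∀ x ∈ h :: rtail, t0 ≤ x.1) :
    ((t0 : Int), "start") ∉ h :: rtail := by
  intro hmem
  have hne' : h ≠ ((t0 : Int), "start") := by simpa using hne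
  have hh1 : h.1 = t0 := by
    rcases List.mem_cons.mp hmem with heq2 | hmem2
    · exact absurd heq2.symm hne'
    · have h1le : h.1 ≤ t0 := by
        have := (List.pairwise_cons.mp hpair).1 _ hmem2
        rcases this with h' | ⟨h', _⟩ <;> simp_all <;> omega
      have h2le : t0 ≤ h.1 := hF1 h (List.mem_cons_self ..)
      omega
  have hcr := hcross h (List.mem_cons_self ..)
  have hhs : pvIsS h = true := by
    rcases hcr with h' | ⟨_, h'⟩
    · omega
    · exact h' rfl
  have hh2 : h.2 = "start" := by simpa [pvIsS] using hhs
  exact hne' (by obtain ⟨a, b⟩ := h; simp_all)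

theorem pv_mem_starts (M : List (Int × String)) (t : Int) :
    t ∈ pvStarts M ↔ ∃ x ∈ M, pvIsS x = true ∧ x.1 = t := by
  simp only [pvStarts, List.mem_map, List.mem_filter]
  constructor
  · rintro ⟨x, ⟨hx, hs⟩, rfl⟩; exact ⟨x, hx, hs, rfl⟩
  · rintro ⟨x, hx, hs, rfl⟩; exact ⟨x, ⟨hx, hs⟩, rfl⟩

theorem pv_starts_block (k : ℕ) (t0 : Int) (rest : List (Int × String)) :
    pvStarts (List.replicate k (t0, "start") ++ rest) = List.replicate k t0 ++ pvStarts rest := by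
  have h1 : pvIsS (t0, "start") = true := rfl
  simp [pvStarts, List.filter_append, h1]

-- MAIN: A's sweep over a pvKeyLe-sorted event list equals B's scan over its start times
theorem pv_main : ∀ (n : ℕ) (L : List (Int × String)), L.length ≤ n →
    ∀ (cur mx : Int) (best : Option Int) (f : Int → Int),
    L.Pairwise pvKeyLe →
    (∀ t ∈ pvStarts L, f t = cur + pvNet L t) →
    (L.foldl pvStepA (cur, mx, best)).2.2 = pvScan f mx best (pvStarts L) := by
  intro n
  induction n with
  | zero =>
    intro L hL cur mx best f _ _
    have hnil : L = [] := by
      cases L with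
      | nil => rfl
      | cons a l => simp at hL
    subst hnil
    simp [pvStarts, pvScan]
  | succ n ih =>
    intro L hL cur mx best f hpair hf
    match L, hL, hpair, hf with
    | [], _, _, _ => simp [pvStarts, pvScan]
    | e :: ltail, hL, hpair, hf =>
      by_cases hS : pvIsS e = true
      · -- start event: consume the whole block of identical start events
        have he2 : e.2 = "start" := by simpa [pvIsS] using hS
        have heq : e = (e.1, "start") := by
          obtain ⟨a, b⟩ := e; simp_all
        set t0 := e.1 with ht0
        set blk := ltail.takeWhile (fun x => x == ((t0 : Int), "start")) with hblk
        set rest := ltail.dropWhile (fun x => x == ((t0 : Int), "start")) with hrest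
        set m := blk.length with hm
        have hblkrep : blk = List.replicate m (t0, "start") := by
          rw [hm]
          exact List.eq_replicate_of_mem (fun b hb => by
            have := List.mem_takeWhile_imp hb
            simpa using this)
        have hLdec : e :: ltail = List.replicate (m + 1) (t0, "start") ++ rest := by
          rw [List.replicate_succ, List.cons_append, ← hblkrep, heq]
          rw [hblk, hrest, List.takeWhile_append_dropWhile]
        rw [hLdec] at hpair hf ⊢
        rw [List.pairwise_append] at hpair
        obtain ⟨_, hprest, hcross⟩ := hpair
        have hhead : ((t0 : Int), "start") ∈ List.replicate (m + 1) ((t0 : Int), "start") :=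
          List.mem_replicate.mpr ⟨by omega, rfl⟩
        have hF1 : ∀ x ∈ rest, t0 ≤ x.1 := by
          intro x hx
          rcases hcross _ hhead x hx with h | ⟨h, _⟩ <;> omega
        have hF2 : ((t0 : Int), "start") ∉ rest := by
          cases hrt : rest with
          | nil => simp
          | cons h rtail =>
            have hdw : ltail.dropWhile (fun x => x == ((t0 : Int), "start")) = h :: rtail := by
              rw [← hrest, hrt]
            have hne : (h == ((t0 : Int), "start")) = false := by
              have hh := List.head?_dropWhile_not (fun x => x == ((t0 : Int), "start")) ltail
              rw [hdw] at hh
              simpa using hh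
            refine pv_F2 t0 h rtail hne (hrt ▸ hprest) ?_ ?_
            · intro x hx; exact hcross _ hhead x (hrt ▸ hx)
            · intro x hx; exact hF1 x (hrt ▸ hx)
        have hF3 : ∀ x ∈ rest, pvIsS x = true → t0 < x.1 := by
          intro x hx hxs
          have h1 : t0 ≤ x.1 := hF1 x hx
          rcases eq_or_lt_of_le h1 with h1 | h1
          · exfalso
            have hx2 : x.2 = "start" := by simpa [pvIsS] using hxs
            have hx' : x = ((t0 : Int), "start") := by
              obtain ⟨a, b⟩ := x
              simp only [Prod.mk.injEq]
              exact ⟨h1.symm, hx2⟩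
            exact hF2 (hx' ▸ hx)
          · exact h1
        have hnetrest : pvNet rest t0 = 0 := by
          have hc1 : rest.countP (fun e => pvIsS e && decide (e.1 ≤ t0)) = 0 := by
            rw [List.countP_eq_zero]
            intro x hx
            simp only [Bool.and_eq_true, decide_eq_true_eq, not_and]
            intro hxs
            have := hF3 x hx hxs
            omega
          have hc2 : rest.countP (fun e => !pvIsS e && decide (e.1 ≤ t0)) = 0 := by
            rw [List.countP_eq_zero]
            intro x hx
            simp only [Bool.and_eq_true, Bool.not_eq_true', decide_eq_true_eq, not_and]
            intro hxs
            rcases hcross _ hhead x hx with h | ⟨h, h'⟩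
            · omega
            · exact absurd (h' rfl) (by simp [hxs])
          simp [pvNet, hc1, hc2]
        have hft0 : f t0 = cur + (m + 1) := by
          have ht0mem : t0 ∈ pvStarts (List.replicate (m + 1) ((t0 : Int), "start") ++ rest) := by
            rw [pv_starts_block]
            exact List.mem_append_left _ (List.mem_replicate.mpr ⟨by omega, rfl⟩)
          rw [hf t0 ht0mem, pv_net_block, hnetrest, if_pos (le_refl t0)]
          push_cast; ring
        rw [pv_blockA, pv_starts_block, pv_blockB, hft0]
        have hlen : rest.length ≤ n := by
          rw [hLdec, List.length_append, List.length_replicate] at hL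
          omega
        refine ih rest hlen _ _ _ f hprest ?_
        intro t ht
        have htL : t ∈ pvStarts (List.replicate (m + 1) ((t0 : Int), "start") ++ rest) := by
          rw [pv_starts_block]; exact List.mem_append_right _ ht
        obtain ⟨x, hx, hxs, rfl⟩ := (pv_mem_starts rest t).mp ht
        rw [hf _ htL, pv_net_block, if_pos (hF1 x hx)]
        push_cast; ring
      · -- end event (everything that is not tagged "start")
        have hstep : pvStepA (cur, mx, best) e = (cur - 1, mx, best) := by
          simp only [pvStepA, pvIsS] at hS ⊢
          rw [if_neg (by simpa using hS)]
        have hstarts : pvStarts (e :: ltail) = pvStarts ltail := by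
          simp [pvStarts, hS]
        obtain ⟨hcross, hptail⟩ := List.pairwise_cons.mp hpair
        rw [List.foldl_cons, hstep, hstarts]
        refine ih ltail (by simpa using hL) _ _ _ f hptail ?_
        intro t ht
        obtain ⟨x, hx, hxs, rfl⟩ := (pv_mem_starts ltail t).mp ht
        have he1 : e.1 ≤ x.1 := by
          rcases hcross x hx with h | ⟨h, _⟩ <;> omega
        have hmem' : x.1 ∈ pvStarts (e :: ltail) := by rw [hstarts]; exact ht
        rw [hf x.1 hmem', pv_net_cons]
        have hS' : pvIsS e = false := by simpa using hS
        rw [hS']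
        simp only [Bool.false_and, Bool.not_false, Bool.true_and, Bool.false_eq_true, if_false,
          decide_eq_true_eq]
        rw [if_pos he1]
        ring

theorem pv_net_flatMap (times : List (Int × Int)) (t : Int) :
    pvNet (pvEv times) t = pvF times t := by
  induction times with
  | nil => simp [pvNet, pvF, pvEv]
  | cons p ps ih =>
    have hS : pvIsS (p.1, "start") = true := rfl
    have hE : pvIsS (p.2, "end") = false := rfl
    simp only [pvEv, List.flatMap_cons, List.cons_append, List.nil_append] at ih ⊢
    rw [pv_net_cons, pv_net_cons, ih]
    simp only [pvF, List.countP_cons, hS, hE, Bool.true_and, Bool.false_and, Bool.not_true,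
      Bool.not_false]
    split_ifs <;> push_cast <;> omega

theorem pv_filter_flatMap (times : List (Int × Int)) :
    (pvEv times).filter pvIsS = times.map (fun p => (p.1, "start")) := by
  induction times with
  | nil => rfl
  | cons p ps ih =>
    have hS : pvIsS (p.1, "start") = true := rfl
    have hE : pvIsS (p.2, "end") = false := rfl
    simp only [pvEv, List.flatMap_cons, List.cons_append, List.nil_append, List.filter_cons,
      hS, hE, List.map_cons] at ih ⊢
    simp [ih]

-- ===== VERDICT (by name: the statement is the Claim_ definition above) =====
theorem best_time_for_party_spec : Claim_equal_best_time_for_party := by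
  intro times _
  unfold Spec_best_time_for_party
  have hev : times.foldl (fun acc p => acc ++ [(p.1, "start"), (p.2, "end")]) ([] : List (Int × String))
      = pvEv times := by
    rw [PySem.List.foldl_append_eq_flatMap (fun p : Int × Int => [(p.1, "start"), (p.2, "end")])
      times []]
    rfl
  have hpair := pv_sorted2_pairwise (pvEv times)
  have hperm := PySem.List.sorted2_perm (pvEv times) (fun x => x.1) (fun x => x.2 == "start") false
  set L := PySem.List.sorted2 (pvEv times) (fun x => x.1) (fun x => x.2 == "start") with hLdef
  -- A's result, through the main sweep/scan correspondence
  have hA : best_time_for_party times = (L.foldl pvStepA (0, 0, none)).2.2 := by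
    simp only [best_time_for_party, hev, hLdef]
  have hmain : (L.foldl pvStepA (0, 0, none)).2.2 = pvScan (pvF times) 0 none (pvStarts L) := by
    refine pv_main L.length L le_rfl 0 0 none (pvF times) hpair ?_
    intro t _
    rw [← pv_net_flatMap times t, pvNet, pvNet, hperm.countP_eq, hperm.countP_eq]
    ring
  -- the start times of the sorted event list are exactly B's sorted candidate list
  have hstarts : PySem.List.sorted (times.map (fun p => p.1)) (fun x => x) = pvStarts L := by
    refine PySem.List.sorted_id_eq_of_perm_of_pairwise _ _ ?_ ?_
    · have h1 := (hperm.filter pvIsS).map (fun e : Int × String => e.1)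
      rw [pv_filter_flatMap, List.map_map] at h1
      simpa [pvStarts] using h1
    · refine List.pairwise_map.mpr ((hpair.filter pvIsS).imp ?_)
      intro a b hab
      rcases hab with h | ⟨h, _⟩ <;> omega
  -- B's result
  have hB : best_time_for_party_alt times
      = pvScan (pvF times) 0 none (PySem.List.sorted (times.map (fun p => p.1)) (fun x => x)) := by
    simp only [best_time_for_party_alt]
    exact pv_foldlB times _ 0 none
  rw [hA, hmain, hB, hstarts]
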